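-- pv_equiv track=rewrite | github.com/jwillmer/NCL | scripts/validate_db_schema.py | _split_top_level_columns
-- ===== SOURCE A (Python) =====
-- def _split_top_level_columns(text: str) -> int:
--     """Given the body of a RETURNS TABLE (...) paren-group, return the top-level
--     comma count + 1 (i.e. number of columns). Handles nested parens in type
--     expressions like vector(1536) or NUMERIC(10,2)."""
--     depth = 0
--     cols = 1
--     for ch in text:
--         if ch == "(":
--             depth += 1
--         elif ch == ")":
--             depth -= 1
--         elif ch == "," and depth == 0:
--             cols += 1
--     return cols
-- ===== SOURCE B (Python) =====
-- def _split_top_level_columns(text: str) -> int: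
--     """Given the body of a RETURNS TABLE (...) paren-group, return the top-level
--     comma count + 1 (i.e. number of columns). Handles nested parens in type
--     expressions like vector(1536) or NUMERIC(10,2)."""
--     # pass 1: build the inclusive running paren depth at each index
--     deltas = [1 if c == "(" else -1 if c == ")" else 0 for c in text]
--     depths = []
--     d = 0
--     for x in deltas:
--         d += x
--         depths.append(d)
--     # pass 2: count commas sitting at depth 0
--     return 1 + sum(1 for c, d in zip(text, depths) if c == "," and d == 0)
-- ===== Notes on version B (the rewrite author's own statement) =====
-- stated objective: alternative
-- what changed: Replaces the fused loop with a mutable depth counter by a build-then-scan decomposition: first materialise the running paren-depth table by prefix sums of per-character deltas, then count commas whose table depth is 0.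
import Mathlib
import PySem

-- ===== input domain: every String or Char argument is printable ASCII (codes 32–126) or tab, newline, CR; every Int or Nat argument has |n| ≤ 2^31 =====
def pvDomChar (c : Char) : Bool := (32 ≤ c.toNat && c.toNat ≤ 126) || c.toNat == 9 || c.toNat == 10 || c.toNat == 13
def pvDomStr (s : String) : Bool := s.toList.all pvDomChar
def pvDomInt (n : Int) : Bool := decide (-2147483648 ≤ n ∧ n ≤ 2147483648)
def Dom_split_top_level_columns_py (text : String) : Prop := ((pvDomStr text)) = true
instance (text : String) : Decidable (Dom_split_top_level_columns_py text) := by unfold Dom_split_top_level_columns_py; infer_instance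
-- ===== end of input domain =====

-- B counts the same columns by a build-then-scan decomposition (explicit depth table, then a
-- count over (char, depth) pairs) instead of A's single fused loop with a mutable depth counter;
-- objective: alternative (same O(n) cost).

-- ===== PORT A =====
-- fused loop: state (depth, cols), one branch chain per character
def split_top_level_columns_py (text : String) : Int :=
  (text.toList.foldl
    (fun (st : Int × Int) ch =>
      if ch = '(' then (st.1 + 1, st.2)
      else if ch = ')' then (st.1 - 1, st.2)
      else if ch = ',' ∧ st.1 = 0 then (st.1, st.2 + 1)
      else st)
    (0, 1)).2

-- ===== PORT B =====
-- pass 1: per-character deltas, then the inclusive running-depth table by prefix sums;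
-- pass 2: count commas whose table depth is 0
def split_top_level_columns_py_alt (text : String) : Int :=
  let deltas := text.toList.map (fun c => if c = '(' then (1 : Int) else if c = ')' then -1 else 0)
  let depths := (deltas.foldl (fun (acc : List Int × Int) x => (acc.1 ++ [acc.2 + x], acc.2 + x)) ([], 0)).1
  1 + (((text.toList.zip depths).filter (fun p => p.1 == ',' && p.2 == 0)).length : Int)

-- ===== PRECONDITION & SPEC =====
def Spec_split_top_level_columns_py (text : String) (out : Int) : Prop := out = split_top_level_columns_py_alt text
instance (text : String) (out : Int) : Decidable (Spec_split_top_level_columns_py text out) := by unfold Spec_split_top_level_columns_py; infer_instance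

-- ===== CLAIM (what is proved, stated in full; the proofs are below) =====
def Claim_equal_split_top_level_columns_py : Prop := ∀ (text : String), Dom_split_top_level_columns_py text → Spec_split_top_level_columns_py text (split_top_level_columns_py text)

-- ===== LEMMAS AND PROOFS =====

def pvDelta (c : Char) : Int := if c = '(' then 1 else if c = ')' then -1 else 0

def pvScan : List Int → Int → List Int
  | [], _ => []
  | x :: xs, d => (d + x) :: pvScan xs (d + x)

def pvCount : List Char → Int → Int
  | [], _ => 0
  | ch :: t, d =>
    if ch = '(' then pvCount t (d + 1)
    else if ch = ')' then pvCount t (d - 1)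
    else (if ch = ',' ∧ d = 0 then 1 else 0) + pvCount t d

theorem pvScan_foldl : ∀ (l pre : List Int) (d : Int),
    (l.foldl (fun (acc : List Int × Int) x => (acc.1 ++ [acc.2 + x], acc.2 + x)) (pre, d)).1
      = pre ++ pvScan l d := by
  intro l
  induction l with
  | nil => simp [pvScan]
  | cons x xs ih => intro pre d; simp [List.foldl, pvScan, ih]

theorem pvA_foldl : ∀ (l : List Char) (d c : Int),
    (l.foldl
      (fun (st : Int × Int) ch =>
        if ch = '(' then (st.1 + 1, st.2)
        else if ch = ')' then (st.1 - 1, st.2)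
        else if ch = ',' ∧ st.1 = 0 then (st.1, st.2 + 1)
        else st)
      (d, c)).2 = c + pvCount l d := by
  intro l
  induction l with
  | nil => simp [pvCount]
  | cons ch t ih =>
    intro d c
    by_cases h1 : ch = '('
    · simp [List.foldl, pvCount, h1, ih]
    · by_cases h2 : ch = ')'
      · simp [List.foldl, pvCount, h1, h2, ih]
      · by_cases h3 : ch = ',' ∧ d = 0
        · simp [List.foldl, pvCount, h1, h2, h3, ih]; ring
        · simp [List.foldl, pvCount, h1, h2, h3, ih]

theorem pvB_count : ∀ (l : List Char) (d : Int),
    (((l.zip (pvScan (l.map pvDelta) d)).filter (fun p => p.1 == ',' && p.2 == 0)).length : Int)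
      = pvCount l d := by
  intro l
  induction l with
  | nil => simp [pvScan, pvCount]
  | cons ch t ih =>
    intro d
    by_cases h1 : ch = '('
    · simp [pvScan, pvCount, pvDelta, h1, List.filter, ih]
    · by_cases h2 : ch = ')'
      · have hsub : d + (-1 : Int) = d - 1 := by ring
        simp [pvScan, pvCount, pvDelta, h1, h2, List.filter, ih, hsub]
      · have hd : pvDelta ch = 0 := by simp [pvDelta, h1, h2]
        by_cases hc : ch = ','
        · by_cases hz : d = 0
          · have : pvCount t (0 : Int) + 1 = 1 + pvCount t 0 := by ring
            simp [pvScan, pvCount, pvDelta, h1, h2, hc, hz, List.filter, ih, this]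
          · simp [pvScan, pvCount, pvDelta, h1, h2, hc, hz, List.filter, ih]
        · simp [pvScan, pvCount, pvDelta, h1, h2, hc, List.filter, ih]

-- ===== VERDICT (by name: the statement is the Claim_ definition above) =====
theorem split_top_level_columns_py_spec : Claim_equal_split_top_level_columns_py := by
  intro text _
  have hmap : text.toList.map (fun c => if c = '(' then (1 : Int) else if c = ')' then -1 else 0)
      = text.toList.map pvDelta := by
    simp [pvDelta]
  show split_top_level_columns_py text = split_top_level_columns_py_alt text
  simp only [split_top_level_columns_py, split_top_level_columns_py_alt, hmap]
  rw [pvA_foldl, pvScan_foldl, List.nil_append, pvB_count]
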